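-- pv_equiv track=rewrite | github.com/AnaClaraZoppiSerpa/GAMDS | helpers/countsHelper.py | _matrix_xor_cost
-- ===== SOURCE A (Python) =====
-- def _poly_xor_cost(poly, ORDER):
--     mask = 1
--     set_bits = 0
--     current_bit = 0
--     while current_bit < ORDER:
--         if (poly & mask) != 0:
--             set_bits += 1
--         mask = mask << 1
--         current_bit += 1
--     return set_bits - 1
--
-- def _matrix_xor_cost(mat, ORDER):
--     total_cost = 0
--     for row in range(len(mat)):
--         row_cost = len(mat) - 1
--         for col in range(len(mat[row])):
--             row_cost += _poly_xor_cost(mat[row][col], ORDER)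
--         total_cost += row_cost
--     return total_cost
-- ===== SOURCE B (Python) =====
-- def _matrix_xor_cost(mat, ORDER):
--     # Bit-plane formulation: flatten the matrix once, start from the closed-form
--     # correction rows*(rows-1) - #cells, then make one pass per bit position,
--     # adding how many cells have that bit set.
--     flat = [x for row in mat for x in row]
--     rows = len(mat)
--     total = rows * (rows - 1) - len(flat)
--     for b in range(ORDER):
--         total += sum((x >> b) & 1 for x in flat)
--     return total
-- ===== Notes on version B (the rewrite author's own statement) =====
-- stated objective: alternative
-- what changed: Transposes the loop nest: instead of A's per-cell while-loop over bits threaded through a per-row cost, B flattens the matrix once, starts from the closed-form correction rows*(rows-1) - #cells, and then counts set bits one bit-plane at a time (one pass over all cells per bit position b < ORDER).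
import Mathlib
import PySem

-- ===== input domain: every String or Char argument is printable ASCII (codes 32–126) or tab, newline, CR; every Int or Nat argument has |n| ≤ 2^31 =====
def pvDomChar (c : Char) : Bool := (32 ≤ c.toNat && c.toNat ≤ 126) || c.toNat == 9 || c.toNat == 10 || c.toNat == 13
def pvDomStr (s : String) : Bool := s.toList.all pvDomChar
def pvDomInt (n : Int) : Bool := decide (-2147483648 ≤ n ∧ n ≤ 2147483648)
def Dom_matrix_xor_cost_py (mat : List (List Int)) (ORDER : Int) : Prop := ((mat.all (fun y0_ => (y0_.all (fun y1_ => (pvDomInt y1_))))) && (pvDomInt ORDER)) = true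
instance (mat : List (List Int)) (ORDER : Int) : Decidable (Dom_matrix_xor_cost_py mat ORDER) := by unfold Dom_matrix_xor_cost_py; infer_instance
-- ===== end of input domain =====

-- B transposes A's loop nest: flatten the matrix once, start from the closed-form correction
-- rows*(rows-1) - #cells, then count set bits one bit-plane at a time (one pass over all
-- cells per bit position). Objective: alternative decomposition, same asymptotic cost.

-- ===== PORT A =====
-- the `while current_bit < ORDER` loop of _poly_xor_cost; `poly & mask` is PySem.Int.band,
-- `mask << 1` is `<<< 1` (exact, PYSEM.md)
def pvPolyLoop (poly ORDER mask set_bits current_bit : Int) : Int :=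
  if current_bit < ORDER then
    pvPolyLoop poly ORDER (mask <<< (1 : Nat))
      (if PySem.Int.band poly mask ≠ 0 then set_bits + 1 else set_bits) (current_bit + 1)
  else set_bits
termination_by (ORDER - current_bit).toNat
decreasing_by omega

def pvPolyXorCost (poly ORDER : Int) : Int := pvPolyLoop poly ORDER 1 0 0 - 1

-- `for row in range(len(mat))` / `for col in range(len(mat[row]))`; the indices are always
-- in range, so `getD` is an exact port of `mat[row]` / `mat[row][col]`
def matrix_xor_cost_py (mat : List (List Int)) (ORDER : Int) : Int :=
  (List.range mat.length).foldl
    (fun total_cost row =>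
      total_cost +
        (List.range (mat.getD row []).length).foldl
          (fun row_cost col => row_cost + pvPolyXorCost ((mat.getD row []).getD col 0) ORDER)
          ((mat.length : Int) - 1))
    0

-- ===== PORT B =====
-- `[x for row in mat for x in row]` is flatMap; `range(ORDER)` is List.range ORDER.toNat
-- (exact: empty when ORDER ≤ 0); Python's `x >> b` and `&` are Lean's `>>>` and
-- PySem.Int.band (exact, PYSEM.md)
def pvBitPlaneSum (flat : List Int) (b : Nat) : Int :=
  (flat.map (fun (x : Int) => PySem.Int.band (x >>> b) 1)).sum   -- sum((x >> b) & 1 for x in flat)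

def matrix_xor_cost_py_alt (mat : List (List Int)) (ORDER : Int) : Int :=
  let flat := mat.flatMap (fun row => row)
  let rows : Int := mat.length
  let total : Int := rows * (rows - 1) - flat.length
  (List.range ORDER.toNat).foldl (fun total b => total + pvBitPlaneSum flat b) total

-- ===== PRECONDITION & SPEC =====
def Spec_matrix_xor_cost_py (mat : List (List Int)) (ORDER : Int) (out : Int) : Prop := out = matrix_xor_cost_py_alt mat ORDER
instance (mat : List (List Int)) (ORDER : Int) (out : Int) : Decidable (Spec_matrix_xor_cost_py mat ORDER out) := by unfold Spec_matrix_xor_cost_py; infer_instance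

-- ===== CLAIM (what is proved, stated in full; the proofs are below) =====
def Claim_equal_matrix_xor_cost_py : Prop := ∀ (mat : List (List Int)) (ORDER : Int), Dom_matrix_xor_cost_py mat ORDER → Spec_matrix_xor_cost_py mat ORDER (matrix_xor_cost_py mat ORDER)

-- ===== LEMMAS AND PROOFS =====

-- number of set bits among the low n bits of x (two's complement), the common spec
def pvG (x : Int) : Nat → Int
  | 0 => 0
  | n + 1 => PySem.Int.mod x 2 + pvG (PySem.Int.floordiv x 2) n

-- A's loop, re-expressed with the fuel explicit
def pvCnt (x m : Int) : Nat → Int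
  | 0 => 0
  | k + 1 => (if PySem.Int.band x m ≠ 0 then (1 : Int) else 0) + pvCnt x (m <<< (1 : Nat)) k

theorem pv_fdiv2 (x : Int) : PySem.Int.floordiv x 2 = x / 2 := by
  unfold PySem.Int.floordiv
  rw [Int.fdiv_eq_ediv, if_pos (Or.inl (by norm_num))]
  ring

theorem pv_fmod2 (x : Int) : PySem.Int.mod x 2 = x % 2 := by
  unfold PySem.Int.mod
  rw [Int.fmod_eq_emod, if_pos (Or.inl (by norm_num))]
  ring

-- Nat bit identity used to shift A's mask into the argument
theorem pvNL1 (a b : Nat) : a &&& (2 * b) = 2 * ((a / 2) &&& b) := by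
  apply Nat.eq_of_testBit_eq
  intro i
  have h1 : 2 * b / 2 = b := by omega
  have h2 : 2 * ((a / 2) &&& b) / 2 = (a / 2) &&& b := by omega
  cases i with
  | zero => simp [Nat.testBit_zero, Nat.mul_mod_right]
  | succ i =>
      rw [Nat.testBit_and, Nat.testBit_add_one, Nat.testBit_add_one, Nat.testBit_add_one,
        h1, h2, Nat.testBit_and]

theorem pv_band_two_mul (x m : Int) (hm : 0 ≤ m) :
    PySem.Int.band x (2 * m) = 2 * PySem.Int.band (PySem.Int.floordiv x 2) m := by
  rw [pv_fdiv2]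
  unfold PySem.Int.band
  by_cases hx : 0 ≤ x
  · have hx2 : 0 ≤ x / 2 := by omega
    rw [if_pos hx, if_pos (by omega : (0:Int) ≤ 2 * m), if_pos hx2, if_pos hm]
    have e1 : (2 * m).toNat = 2 * m.toNat := by omega
    have e2 : (x / 2).toNat = x.toNat / 2 := by omega
    rw [e1, e2, pvNL1]
    push_cast
    ring
  · have hx2 : ¬ 0 ≤ x / 2 := by omega
    rw [if_neg hx, if_pos (by omega : (0:Int) ≤ 2 * m), if_neg hx2, if_pos hm]
    have e1 : (2 * m).toNat = 2 * m.toNat := by omega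
    have e2 : (-(x / 2) - 1).toNat = (-x - 1).toNat / 2 := by omega
    rw [e1, e2, Nat.and_comm (2 * m.toNat), pvNL1, Nat.and_comm ((-x - 1).toNat / 2)]
    have le : m.toNat &&& ((-x - 1).toNat / 2) ≤ m.toNat := Nat.and_le_left
    generalize hc : m.toNat &&& ((-x - 1).toNat / 2) = c at le ⊢
    omega

-- loop-shape lemmas for A
theorem pvLoop_eq_cnt (k : Nat) : ∀ (x O m s b : Int), (O - b).toNat = k →
    pvPolyLoop x O m s b = s + pvCnt x m k := by
  induction k with
  | zero =>
      intro x O m s b h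
      rw [pvPolyLoop, if_neg (by omega)]
      simp [pvCnt]
  | succ k ih =>
      intro x O m s b h
      have hb : b < O := by omega
      rw [pvPolyLoop, if_pos hb, ih x O (m <<< (1 : Nat)) _ (b + 1) (by omega)]
      simp only [pvCnt]
      split_ifs <;> ring

theorem pvCnt_shift (k : Nat) : ∀ (x m : Int), 0 ≤ m →
    pvCnt x (m <<< (1 : Nat)) k = pvCnt (PySem.Int.floordiv x 2) m k := by
  induction k with
  | zero => intro x m hm; simp [pvCnt]
  | succ k ih =>
      intro x m hm
      have hsl : ∀ y : Int, y <<< (1 : Nat) = 2 * y := by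
        intro y; rw [Int.shiftLeft_eq]; ring
      simp only [pvCnt]
      rw [hsl m, pv_band_two_mul x m hm]
      have htail : pvCnt x ((2 * m) <<< (1 : Nat)) k = pvCnt (PySem.Int.floordiv x 2) (2 * m) k :=
        ih x (2 * m) (by omega)
      rw [htail]
      have hhead : (2 * PySem.Int.band (PySem.Int.floordiv x 2) m ≠ 0) ↔
          (PySem.Int.band (PySem.Int.floordiv x 2) m ≠ 0) := by
        constructor <;> intro h <;> omega
      simp only [hhead]

theorem pvCnt_one (k : Nat) : ∀ x : Int, pvCnt x 1 k = pvG x k := by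
  induction k with
  | zero => intro x; simp [pvCnt, pvG]
  | succ k ih =>
      intro x
      simp only [pvCnt, pvG]
      rw [pvCnt_shift k x 1 (by norm_num), ih, PySem.Int.band_one]
      have h : PySem.Int.mod x 2 = 0 ∨ PySem.Int.mod x 2 = 1 := by rw [pv_fmod2]; omega
      split_ifs with hc <;> omega

theorem pvCell (x O : Int) : pvPolyXorCost x O = pvG x O.toNat - 1 := by
  unfold pvPolyXorCost
  rw [pvLoop_eq_cnt O.toNat x O 1 0 0 (by omega), pvCnt_one]
  ring

-- list plumbing
theorem pvRangeFold {α : Type} (d : α) (g : Int → α → Int) :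
    ∀ (xs : List α) (init : Int),
      (List.range xs.length).foldl (fun a i => g a (xs.getD i d)) init = xs.foldl g init := by
  intro xs
  induction xs with
  | nil => intro init; simp
  | cons y ys ih =>
      intro init
      simp only [List.length_cons, List.range_succ_eq_map, List.foldl_cons, List.foldl_map,
        List.getD_cons_zero, List.getD_cons_succ]
      exact ih (g init y)

theorem pvRow (O : Int) : ∀ r : List Int,
    (r.map (fun x => pvPolyXorCost x O)).sum
      = (r.map (fun x => pvG x O.toNat)).sum - r.length := by
  intro r
  induction r with
  | nil => simp
  | cons x xs ih =>
      simp only [List.map_cons, List.sum_cons, List.length_cons]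
      rw [ih, pvCell]
      push_cast
      ring

theorem pvAfold (O C : Int) : ∀ (mat : List (List Int)) (init : Int),
    mat.foldl (fun a r => a + (List.range r.length).foldl
        (fun rc col => rc + pvPolyXorCost (r.getD col 0) O) C) init
      = init + mat.length * C
        + (mat.map (fun r => (r.map (fun x => pvG x O.toNat)).sum)).sum
        - (mat.map (fun r => (r.length : Int))).sum := by
  intro mat
  induction mat with
  | nil => intro init; simp
  | cons r rs ih =>
      intro init
      simp only [List.foldl_cons, List.map_cons, List.sum_cons, List.length_cons]
      rw [ih, pvRangeFold (0:Int) (fun rc x => rc + pvPolyXorCost x O) r C,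
        PySem.List.foldl_add r (fun x => pvPolyXorCost x O) C, pvRow O r]
      push_cast
      ring

-- B-side: bit-plane lemmas
theorem pvShiftSucc (x : Int) (b : Nat) : x >>> (b + 1) = (x >>> (1 : Nat)) >>> b := by
  simp only [Int.shiftRight_eq_div_pow]
  push_cast
  rw [pow_succ, mul_comm]
  rw [show x / 2 / (2:ℤ)^b = x / (2 * 2^b) from Int.ediv_ediv_of_nonneg (by norm_num)]

theorem pvShiftOne (x : Int) : x >>> (1 : Nat) = PySem.Int.floordiv x 2 := by
  simp [Int.shiftRight_eq_div_pow, PySem.Int.floordiv]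
  rw [Int.fdiv_eq_ediv]
  simp

-- the per-cell ("vertical") sum over bit positions of bit b of x
def pvCellBits (x : Int) (n : Nat) : Int :=
  ((List.range n).map (fun (b : Nat) => PySem.Int.band (x >>> b) 1)).sum

theorem pvGbits (n : Nat) : ∀ x : Int, pvCellBits x n = pvG x n := by
  induction n with
  | zero => intro x; simp [pvCellBits, pvG]
  | succ n ih =>
      intro x
      unfold pvCellBits
      rw [List.range_succ_eq_map]
      simp only [List.map_cons, List.sum_cons, List.map_map]
      have he : ((fun (b : Nat) => PySem.Int.band (x >>> b) 1) ∘ (fun i => i + 1))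
          = fun (b : Nat) => PySem.Int.band ((PySem.Int.floordiv x 2) >>> b) 1 := by
        funext b
        simp only [Function.comp]
        rw [pvShiftSucc, pvShiftOne]
      rw [he]
      have ih2 := ih (PySem.Int.floordiv x 2)
      unfold pvCellBits at ih2
      rw [ih2]
      simp only [pvG]
      have h0 : x >>> (0 : Nat) = x := by simp [Int.shiftRight_eq_div_pow]
      rw [h0, PySem.Int.band_one]

-- pointwise sum of maps
theorem pvSumMapAdd {α : Type} (l : List α) (f g : α → Int) :
    (l.map fun x => f x + g x).sum = (l.map f).sum + (l.map g).sum := by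
  induction l with
  | nil => simp
  | cons y ys ih => simp only [List.map_cons, List.sum_cons, ih]; ring

theorem pvBitPlaneSum_cons (x : Int) (xs : List Int) (b : Nat) :
    pvBitPlaneSum (x :: xs) b = PySem.Int.band (x >>> b) 1 + pvBitPlaneSum xs b := by
  simp [pvBitPlaneSum]

-- exchange the order of summation (bit positions ↔ cells)
theorem pvSwap (n : Nat) : ∀ (l : List Int),
    ((List.range n).map (fun b => pvBitPlaneSum l b)).sum
      = (l.map (fun x => pvCellBits x n)).sum := by
  intro l
  induction l with
  | nil => simp [pvBitPlaneSum]
  | cons y ys ih =>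
      simp only [List.map_cons, List.sum_cons]
      rw [← ih]
      have hp : (fun b => pvBitPlaneSum (y :: ys) b)
          = fun (b : Nat) => PySem.Int.band (y >>> b) 1 + pvBitPlaneSum ys b := by
        funext b; exact pvBitPlaneSum_cons y ys b
      rw [hp, pvSumMapAdd]
      rfl

-- flattening: sums and lengths over the flat list
theorem pvFlatSum (g : Int → Int) : ∀ (mat : List (List Int)),
    ((mat.flatMap (fun row => row)).map g).sum
      = (mat.map (fun r => (r.map g).sum)).sum := by
  intro mat
  induction mat with
  | nil => simp
  | cons r rs ih =>
      simp only [List.flatMap_cons, List.map_append, List.sum_append, List.map_cons,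
        List.sum_cons, ih]

theorem pvFlatLen : ∀ (mat : List (List Int)),
    (((mat.flatMap (fun row => row)).length : Int))
      = (mat.map (fun r => (r.length : Int))).sum := by
  intro mat
  induction mat with
  | nil => simp
  | cons r rs ih =>
      simp only [List.flatMap_cons, List.length_append, List.map_cons, List.sum_cons, ← ih]
      push_cast
      ring

-- ===== VERDICT (by name: the statement is the Claim_ definition above) =====
theorem matrix_xor_cost_py_spec : Claim_equal_matrix_xor_cost_py := by
  intro mat ORDER _
  show matrix_xor_cost_py mat ORDER = matrix_xor_cost_py_alt mat ORDER
  have hA : matrix_xor_cost_py mat ORDER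
      = 0 + (mat.length : Int) * ((mat.length : Int) - 1)
        + (mat.map (fun r => (r.map (fun x => pvG x ORDER.toNat)).sum)).sum
        - (mat.map (fun r => (r.length : Int))).sum := by
    calc matrix_xor_cost_py mat ORDER
        = mat.foldl (fun a r => a + (List.range r.length).foldl
            (fun rc col => rc + pvPolyXorCost (r.getD col 0) ORDER)
            ((mat.length : Int) - 1)) 0 :=
          pvRangeFold ([] : List Int)
            (fun a r => a + (List.range r.length).foldl
              (fun rc col => rc + pvPolyXorCost (r.getD col 0) ORDER)
              ((mat.length : Int) - 1)) mat 0
      _ = _ := pvAfold ORDER ((mat.length : Int) - 1) mat 0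
  have hB : matrix_xor_cost_py_alt mat ORDER
      = ((mat.length : Int) * ((mat.length : Int) - 1)
          - ((mat.flatMap (fun row => row)).length : Int))
        + ((List.range ORDER.toNat).map
            (fun b => pvBitPlaneSum (mat.flatMap (fun row => row)) b)).sum := by
    show (List.range ORDER.toNat).foldl
        (fun total b => total + pvBitPlaneSum (mat.flatMap (fun row => row)) b)
        ((mat.length : Int) * ((mat.length : Int) - 1)
          - ((mat.flatMap (fun row => row)).length : Int)) = _
    rw [PySem.List.foldl_add (List.range ORDER.toNat)
      (fun b => pvBitPlaneSum (mat.flatMap (fun row => row)) b)]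
  have hcell : (fun x => pvCellBits x ORDER.toNat) = fun x => pvG x ORDER.toNat := by
    funext x; exact pvGbits ORDER.toNat x
  rw [hA, hB, pvSwap ORDER.toNat (mat.flatMap (fun row => row)), hcell, pvFlatLen mat,
    pvFlatSum (fun x => pvG x ORDER.toNat)]
  ring
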